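-- pv_equiv track=rewrite | github.com/JakubOrz/MPP8_s21001 | Biblioteki/Core.py | decode_word
-- ===== SOURCE A (Python) =====
-- def decode_word(word: str, coding: dict) -> str:
--     decoding = {value: key for key, value in coding.items()}
--     buffer = ""
--     result = ""
--     for character in word:
--         buffer += character
--         decoded = decoding.get(buffer)
--         if decoded is not None:
--             result += decoded
--             buffer = ""
--     return result
-- ===== SOURCE B (Python) =====
-- def decode_word(word: str, coding: dict) -> str:
--     decoding = {value: key for key, value in coding.items()}
--     maxlen = 0
--     for v in decoding:
--         if len(v) > maxlen:
--             maxlen = len(v)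
--     out = []
--     i = 0
--     n = len(word)
--     while i < n:
--         decoded = None
--         for j in range(1, min(maxlen, n - i) + 1):
--             decoded = decoding.get(word[i:i + j])
--             if decoded is not None:
--                 out.append(decoded)
--                 i += j
--                 break
--         if decoded is None:
--             break
--     return "".join(out)
-- ===== Notes on version B (the rewrite author's own statement) =====
-- stated objective: alternative
-- what changed: A folds over the word accumulating a growing buffer and testing it against the decoding dict after every character; B precomputes the maximum code length and decodes with an index loop that searches, at each position, for the shortest matching prefix of length at most maxlen, so it never builds or hashes buffers longer than the longest code.
import Mathlib
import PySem

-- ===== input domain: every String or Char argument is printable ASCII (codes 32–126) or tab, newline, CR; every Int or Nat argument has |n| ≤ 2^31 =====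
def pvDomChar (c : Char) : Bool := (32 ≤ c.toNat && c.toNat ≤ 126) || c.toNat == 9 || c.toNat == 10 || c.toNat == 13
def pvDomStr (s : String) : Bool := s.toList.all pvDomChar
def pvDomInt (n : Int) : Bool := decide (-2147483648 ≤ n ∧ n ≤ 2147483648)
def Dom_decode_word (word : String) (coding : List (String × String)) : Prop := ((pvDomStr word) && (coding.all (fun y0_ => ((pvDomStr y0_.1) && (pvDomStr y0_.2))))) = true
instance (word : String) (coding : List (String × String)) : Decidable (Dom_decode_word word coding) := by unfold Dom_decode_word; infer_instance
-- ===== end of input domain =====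

-- B replaces A's per-character buffer accumulation with a recursive shortest-match search bounded
-- by the longest code length (objective: alternative decomposition; same observable behaviour).

-- shared argument normalisation: the Python parameter `coding` is a dict; its items (insertion
-- order, duplicate keys collapsed last-wins in place) feed the value→key comprehension of BOTH
-- Pythons. Strings are handled as List Char throughout (exact for every str on this domain).
def pvDecoding (coding : List (String × String)) : PySem.Dict (List Char) (List Char) :=
  (PySem.Dict.ofList coding).items.foldl
    (fun d kv => d.insert kv.2.toList kv.1.toList) PySem.Dict.empty

-- ===== PORT A =====
-- literal port of A: fold over the word's characters with state (buffer, result)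
def decode_word (word : String) (coding : List (String × String)) : String :=
  let decoding := pvDecoding coding
  let r := word.toList.foldl
    (fun (st : List Char × List Char) character =>
      let buffer := st.1 ++ [character]
      match decoding.get? buffer with
      | some decoded => ([], st.2 ++ decoded)
      | none => (buffer, st.2)) ([], [])
  String.mk r.2

-- ===== PORT B =====
-- Source B's inner `for j in range(1, min(maxlen, len(rest)) + 1)` loop: try the prefixes of `rest`
-- of length j, j+1, … (cnt iterations left); return the decoded key and the matched length.
def bFind (D : PySem.Dict (List Char) (List Char)) (rest : List Char) (j cnt : Nat) :
    Option (List Char × Nat) :=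
  match cnt with
  | 0 => none
  | cnt' + 1 =>
    match D.get? (rest.take j) with
    | some decoded => some (decoded, j)
    | none => bFind D rest (j + 1) cnt'

-- termination fact for bGo: the matched length is at least the starting j
theorem bFind_some_ge (D : PySem.Dict (List Char) (List Char)) (rest : List Char) :
    ∀ cnt j d j', bFind D rest j cnt = some (d, j') → j ≤ j' := by
  intro cnt
  induction cnt with
  | zero => intro j d j' h; simp [bFind] at h
  | succ n ih =>
    intro j d j' h
    simp only [bFind] at h
    cases hg : D.get? (rest.take j) with
    | some v => rw [hg] at h; simp at h; omega
    | none => rw [hg] at h; exact Nat.le_of_succ_le (ih (j + 1) d j' h)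

-- Source B's `while i < n` loop: `rest` is the unread suffix word[i:], `out` the joined pieces so far
def bLoop (D : PySem.Dict (List Char) (List Char)) (maxlen : Nat) (rest out : List Char) :
    List Char :=
  match h : bFind D rest 1 (min maxlen rest.length) with
  | none => out
  | some (decoded, j) => bLoop D maxlen (rest.drop j) (out ++ decoded)
termination_by rest.length
decreasing_by
  have h1 : 1 ≤ j := bFind_some_ge D rest _ 1 decoded j h
  have h2 : min maxlen rest.length ≠ 0 := by
    intro h0; rw [h0] at h; simp [bFind] at h
  simp only [List.length_drop]
  omega

def decode_word_alt (word : String) (coding : List (String × String)) : String :=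
  let decoding := pvDecoding coding
  let maxlen := decoding.keys.foldl (fun m v => if v.length > m then v.length else m) 0
  String.mk (bLoop decoding maxlen word.toList [])

-- ===== PRECONDITION & SPEC =====
def Spec_decode_word (word : String) (coding : List (String × String)) (out : String) : Prop := out = decode_word_alt word coding
instance (word : String) (coding : List (String × String)) (out : String) : Decidable (Spec_decode_word word coding out) := by unfold Spec_decode_word; infer_instance

-- ===== CLAIM (what is proved, stated in full; the proofs are below) =====
def Claim_equal_decode_word : Prop := ∀ (word : String) (coding : List (String × String)), Dom_decode_word word coding → Spec_decode_word word coding (decode_word word coding)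


-- ===== LEMMAS AND PROOFS =====

-- A's loop step
def aStep (D : PySem.Dict (List Char) (List Char)) (st : List Char × List Char) (c : Char) :
    List Char × List Char :=
  let buffer := st.1 ++ [c]
  match D.get? buffer with
  | some decoded => ([], st.2 ++ decoded)
  | none => (buffer, st.2)

-- A's scan for the next match: grow buf by one char until it is a key
def scanD (D : PySem.Dict (List Char) (List Char)) :
    List Char → List Char → Option (List Char × List Char)
  | [], _ => none
  | c :: cs, buf =>
    match D.get? (buf ++ [c]) with
    | some d => some (d, cs)
    | none => scanD D cs (buf ++ [c])

theorem scanD_length (D : PySem.Dict (List Char) (List Char)) :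
    ∀ cs buf d rest, scanD D cs buf = some (d, rest) → rest.length < cs.length := by
  intro cs
  induction cs with
  | nil => intro buf d rest h; simp [scanD] at h
  | cons c cs ih =>
    intro buf d rest h
    simp only [scanD] at h
    cases hg : D.get? (buf ++ [c]) with
    | some v => rw [hg] at h; simp at h; simp [h.2]
    | none => rw [hg] at h; exact Nat.lt_succ_of_lt (ih _ d rest h)

def aRun (D : PySem.Dict (List Char) (List Char)) (cs : List Char) : List Char :=
  match _h : scanD D cs [] with
  | none => []
  | some (d, rest) => d ++ aRun D rest
termination_by cs.length
decreasing_by exact scanD_length D cs [] d rest _h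

theorem aRun_none (D : PySem.Dict (List Char) (List Char)) (cs : List Char)
    (h : scanD D cs [] = none) : aRun D cs = [] := by
  rw [aRun]; split
  · rfl
  · rename_i d rest h2; rw [h] at h2; simp at h2

theorem aRun_some (D : PySem.Dict (List Char) (List Char)) (cs d rest : List Char)
    (h : scanD D cs [] = some (d, rest)) : aRun D cs = d ++ aRun D rest := by
  rw [aRun]; split
  · rename_i h2; rw [h] at h2; simp at h2
  · rename_i d' rest' h2; rw [h] at h2
    injection h2 with h3; injection h3 with h4 h5; rw [h4, h5]

theorem bLoop_none (D : PySem.Dict (List Char) (List Char)) (M : Nat) (rest out : List Char)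
    (h : bFind D rest 1 (min M rest.length) = none) : bLoop D M rest out = out := by
  rw [bLoop]; split
  · rfl
  · rename_i d j h2; rw [h] at h2; simp at h2

theorem bLoop_some (D : PySem.Dict (List Char) (List Char)) (M : Nat) (rest out d : List Char)
    (j : Nat) (h : bFind D rest 1 (min M rest.length) = some (d, j)) :
    bLoop D M rest out = bLoop D M (rest.drop j) (out ++ d) := by
  rw [bLoop]; split
  · rename_i h2; rw [h] at h2; simp at h2
  · rename_i d' j' h2; rw [h] at h2
    injection h2 with h3; injection h3 with h4 h5; rw [h4, h5]

theorem foldl_aStep_scanD (D : PySem.Dict (List Char) (List Char)) :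
    ∀ cs buf res, (cs.foldl (aStep D) (buf, res)).2 =
      (match scanD D cs buf with
       | none => res
       | some (d, rest) => (rest.foldl (aStep D) ([], res ++ d)).2) := by
  intro cs
  induction cs with
  | nil => intro buf res; simp [scanD]
  | cons c cs ih =>
    intro buf res
    simp only [List.foldl_cons, scanD, aStep]
    cases hg : D.get? (buf ++ [c]) with
    | some v => simp
    | none => simpa using ih (buf ++ [c]) res

theorem foldl_aStep_aRun (D : PySem.Dict (List Char) (List Char)) :
    ∀ n cs, cs.length ≤ n → ∀ res, (cs.foldl (aStep D) ([], res)).2 = res ++ aRun D cs := by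
  intro n
  induction n with
  | zero =>
    intro cs hcs res
    have h0 : cs = [] := List.eq_nil_of_length_eq_zero (Nat.le_zero.mp hcs)
    subst h0
    rw [aRun_none D [] rfl]; simp
  | succ n ih =>
    intro cs hcs res
    rw [foldl_aStep_scanD]
    cases h : scanD D cs [] with
    | none => rw [aRun_none D cs h]; simp
    | some p =>
      obtain ⟨d, rest⟩ := p
      have hlt := scanD_length D cs [] d rest h
      rw [aRun_some D cs d rest h]
      simp only
      rw [ih rest (by omega) (res ++ d), List.append_assoc]

-- B's search expressed with the remaining suffix instead of the matched length
def finda (D : PySem.Dict (List Char) (List Char)) (full : List Char) (j : Nat) :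
    Option (List Char × List Char) :=
  if full.length < j then none
  else
    match D.get? (full.take j) with
    | some d => some (d, full.drop j)
    | none => finda D full (j + 1)
termination_by full.length + 1 - j

theorem scanD_eq_finda (D : PySem.Dict (List Char) (List Char)) (full : List Char) :
    ∀ k j, k = full.length - j →
      scanD D (full.drop j) (full.take j) = finda D full (j + 1) := by
  intro k
  induction k with
  | zero =>
    intro j hj
    have hge : full.length ≤ j := by omega
    rw [List.drop_eq_nil_of_le hge, finda]
    simp [scanD, Nat.lt_succ_of_le hge]
  | succ n ih =>
    intro j hj
    have hlt : j < full.length := by omega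
    rw [List.drop_eq_getElem_cons hlt]
    simp only [scanD]
    have htake : full.take j ++ [full[j]] = full.take (j + 1) := by
      rw [List.take_succ, List.getElem?_eq_getElem hlt]; rfl
    rw [htake, finda]
    simp only [if_neg (by omega : ¬ full.length < j + 1)]
    cases hg : D.get? (full.take (j + 1)) with
    | some v => rfl
    | none =>
      have := ih (j + 1) (by omega)
      simpa using this

theorem finda_none_of_gt (D : PySem.Dict (List Char) (List Char)) (full : List Char) (M : Nat)
    (hM : ∀ p d, D.get? p = some d → p.length ≤ M) :
    ∀ k j, k = full.length + 1 - j → M < j → finda D full j = none := by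
  intro k
  induction k with
  | zero =>
    intro j hj hMj
    rw [finda]; simp only [if_pos (by omega : full.length < j)]
  | succ n ih =>
    intro j hj hMj
    rw [finda]
    by_cases hl : full.length < j
    · simp [hl]
    · simp only [if_neg hl]
      cases hg : D.get? (full.take j) with
      | some v =>
        exfalso
        have := hM _ _ hg
        rw [List.length_take] at this
        omega
      | none => exact ih (j + 1) (by omega) (by omega)

theorem bFind_eq_finda (D : PySem.Dict (List Char) (List Char)) (full : List Char) (M : Nat)
    (hM : ∀ p d, D.get? p = some d → p.length ≤ M) :
    ∀ cnt j, 1 ≤ j → min M full.length + 1 = j + cnt →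
      (bFind D full j cnt).map (fun p => (p.1, full.drop p.2)) = finda D full j := by
  intro cnt
  induction cnt with
  | zero =>
    intro j hj hcnt
    simp only [bFind, Option.map_none]
    by_cases hl : full.length < j
    · rw [finda]; simp [hl]
    · exact (finda_none_of_gt D full M hM (full.length + 1 - j) j rfl (by omega)).symm
  | succ n ih =>
    intro j hj hcnt
    simp only [bFind]
    rw [finda]
    simp only [if_neg (by omega : ¬ full.length < j)]
    cases hg : D.get? (full.take j) with
    | some v => simp
    | none => exact ih (j + 1) (by omega) (by omega)

theorem bLoop_eq_aRun (D : PySem.Dict (List Char) (List Char)) (M : Nat)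
    (hM : ∀ p d, D.get? p = some d → p.length ≤ M) :
    ∀ n cs, cs.length ≤ n → ∀ out, bLoop D M cs out = out ++ aRun D cs := by
  intro n
  induction n with
  | zero =>
    intro cs hcs out
    have h0 : cs = [] := List.eq_nil_of_length_eq_zero (Nat.le_zero.mp hcs)
    subst h0
    rw [bLoop_none D M [] out (by simp [bFind]), aRun_none D [] rfl, List.append_nil]
  | succ n ih =>
    intro cs hcs out
    have hscan : scanD D cs [] = finda D cs 1 := by
      simpa using scanD_eq_finda D cs cs.length 0 (by omega)
    have hbf := bFind_eq_finda D cs M hM (min M cs.length) 1 (le_refl 1) (by omega)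
    cases hb : bFind D cs 1 (min M cs.length) with
    | none =>
      rw [hb] at hbf
      simp only [Option.map_none] at hbf
      rw [bLoop_none D M cs out hb, aRun_none D cs (by rw [hscan, ← hbf]), List.append_nil]
    | some p =>
      obtain ⟨d, j⟩ := p
      rw [hb] at hbf
      simp only [Option.map_some] at hbf
      have hs : scanD D cs [] = some (d, cs.drop j) := by rw [hscan, ← hbf]
      have hj : 1 ≤ j := bFind_some_ge D cs _ 1 d j hb
      have hne : min M cs.length ≠ 0 := by
        intro h0; rw [h0] at hb; simp [bFind] at hb
      rw [bLoop_some D M cs out d j hb, aRun_some D cs d (cs.drop j) hs]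
      rw [ih (cs.drop j) (by simp only [List.length_drop]; omega) (out ++ d), List.append_assoc]

-- the maxlen Source B computes bounds the length of every key of the decoding dict
theorem foldl_max_len_bound (l : List (List Char)) :
    ∀ acc, (∀ k, k ∈ l → k.length ≤ l.foldl (fun m v => if v.length > m then v.length else m) acc)
      ∧ acc ≤ l.foldl (fun m v => if v.length > m then v.length else m) acc := by
  induction l with
  | nil => intro acc; simp
  | cons x l ih =>
    intro acc
    simp only [List.foldl_cons]
    constructor
    · intro k hk
      rcases List.mem_cons.mp hk with h | h
      · subst h
        by_cases hx : k.length > acc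
        · rw [if_pos hx]; exact (ih k.length).2
        · rw [if_neg hx]; exact le_trans (by omega) (ih acc).2
      · by_cases hx : x.length > acc
        · rw [if_pos hx]; exact (ih _).1 k h
        · rw [if_neg hx]; exact (ih _).1 k h
    · by_cases hx : x.length > acc
      · rw [if_pos hx]; exact le_trans (by omega) (ih _).2
      · rw [if_neg hx]; exact (ih _).2

theorem decoding_key_len_bound (coding : List (String × String)) :
    ∀ p d, (pvDecoding coding).get? p = some d →
      p.length ≤ (pvDecoding coding).keys.foldl (fun m v => if v.length > m then v.length else m) 0 := by
  intro p d h
  have hmem : p ∈ (pvDecoding coding).keys := by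
    by_contra hn
    rw [← PySem.Dict.get?_eq_none_iff_not_mem_keys] at hn
    rw [h] at hn; simp at hn
  exact (foldl_max_len_bound (pvDecoding coding).keys 0).1 p hmem

-- ===== VERDICT (by name: the statement is the Claim_ definition above) =====
theorem decode_word_spec : Claim_equal_decode_word := by
  intro word coding _
  unfold Spec_decode_word decode_word decode_word_alt
  simp only
  congr 1
  rw [show (fun (st : List Char × List Char) character =>
        let buffer := st.1 ++ [character]
        match (pvDecoding coding).get? buffer with
        | some decoded => (([] : List Char), st.2 ++ decoded)
        | none => (buffer, st.2)) = aStep (pvDecoding coding) from rfl]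
  rw [foldl_aStep_aRun (pvDecoding coding) word.toList.length word.toList (le_refl _) []]
  rw [bLoop_eq_aRun (pvDecoding coding) _ (decoding_key_len_bound coding)
        word.toList.length word.toList (le_refl _) []]
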